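-- pv_equiv track=rewrite | github.com/aehrc/real-time-fhir | dashapp/event/reference.py | categorize_references
-- ===== SOURCE A (Python) =====
-- def categorize_references(references):
--     # get resource types and reference ids
--     rtypes = [item.split('?')[0] if '?' in item else item.split('/')[0] for item in references]
--     reference_ids = [item.split('|')[1] if '?' in item else item.split('/')[1] for item in references]
--
--     # build reference dict from above lists
--     reference_dict = {}
--     for i in range(len(rtypes)):
--         if rtypes[i] in reference_dict:
--             reference_dict[rtypes[i]].append(reference_ids[i])
--         else:
--             reference_dict[rtypes[i]] = [reference_ids[i]]
--     return reference_dict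
-- ===== SOURCE B (Python) =====
-- def categorize_references(references):
--     # one pass: parse each reference and group it immediately
--     reference_dict = {}
--     for item in references:
--         if '?' in item:
--             rtype, rid = item.split('?')[0], item.split('|')[1]
--         else:
--             rtype, rid = item.split('/')[0], item.split('/')[1]
--         reference_dict.setdefault(rtype, []).append(rid)
--     return reference_dict
-- ===== Notes on version B (the rewrite author's own statement) =====
-- stated objective: simpler
-- what changed: B fuses A's two list comprehensions and index-driven dict loop into a single pass that parses each reference and inserts it via setdefault(...).append(...), eliminating the two parallel intermediate lists.
import Mathlib
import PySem

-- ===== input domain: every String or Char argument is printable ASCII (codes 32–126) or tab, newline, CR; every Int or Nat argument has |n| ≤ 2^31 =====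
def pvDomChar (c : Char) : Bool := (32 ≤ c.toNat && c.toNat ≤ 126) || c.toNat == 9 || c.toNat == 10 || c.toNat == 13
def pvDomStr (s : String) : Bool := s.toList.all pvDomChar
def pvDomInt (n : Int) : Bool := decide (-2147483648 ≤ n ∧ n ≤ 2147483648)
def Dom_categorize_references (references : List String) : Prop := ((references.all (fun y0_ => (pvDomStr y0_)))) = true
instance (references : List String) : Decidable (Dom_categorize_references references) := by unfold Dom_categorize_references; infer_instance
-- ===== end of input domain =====

-- B fuses A's two list comprehensions and index loop into one pass using setdefault(...).append(...); equivalence of return values proved on Pre_ (inputs where A raises no IndexError).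


-- ===== PORT A =====
-- split('x')[k] is ported as pyGetD ((split? item "x").getD []) k ""; the default "" is only
-- reached where Python raises IndexError, which Pre_ excludes.
def categorize_references (references : List String) : List (String × List String) :=
  let rtypes := references.map (fun item =>
    if PySem.Str.isIn "?" item then PySem.List.pyGetD ((PySem.Str.split? item "?").getD []) 0 ""
    else PySem.List.pyGetD ((PySem.Str.split? item "/").getD []) 0 "")
  let reference_ids := references.map (fun item =>
    if PySem.Str.isIn "?" item then PySem.List.pyGetD ((PySem.Str.split? item "|").getD []) 1 ""
    else PySem.List.pyGetD ((PySem.Str.split? item "/").getD []) 1 "")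
  let reference_dict := (PySem.List.pyRange 0 (PySem.List.len rtypes) 1).foldl
    (fun d i =>
      let k := PySem.List.pyGetD rtypes i ""
      let v := PySem.List.pyGetD reference_ids i ""
      if d.contains k then d.modify k [] (fun l => l ++ [v]) else d.insert k [v])
    PySem.Dict.empty
  reference_dict.items

-- ===== PORT B =====
def categorize_references_alt (references : List String) : List (String × List String) :=
  (references.foldl
    (fun d item =>
      let p :=
        if PySem.Str.isIn "?" item then
          (PySem.List.pyGetD ((PySem.Str.split? item "?").getD []) 0 "",
           PySem.List.pyGetD ((PySem.Str.split? item "|").getD []) 1 "")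
        else
          (PySem.List.pyGetD ((PySem.Str.split? item "/").getD []) 0 "",
           PySem.List.pyGetD ((PySem.Str.split? item "/").getD []) 1 "")
      -- reference_dict.setdefault(rtype, []).append(rid)
      (d.setdefault p.1 []).modify p.1 [] (fun l => l ++ [p.2]))
    PySem.Dict.empty).items

-- ===== PRECONDITION & SPEC =====
-- Pre_ excludes exactly the inputs on which Python A raises IndexError: an item containing
-- '?' but no '|', or an item without '?' and without '/'.  (Python B raises there too.)
def Pre_categorize_references (references : List String) : Prop :=
  (references.all (fun item =>
    if PySem.Str.isIn "?" item then PySem.Str.isIn "|" item else PySem.Str.isIn "/" item)) = true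
instance (references : List String) : Decidable (Pre_categorize_references references) := by
  unfold Pre_categorize_references; infer_instance
def pvWitness_categorize_references : List String :=
  ["Observation?code=x|9", "Patient/1", "Patient/2"]
def Spec_categorize_references (references : List String) (out : List (String × List String)) : Prop :=
  out = categorize_references_alt references
instance (references : List String) (out : List (String × List String)) : Decidable (Spec_categorize_references references out) := by
  unfold Spec_categorize_references; infer_instance

-- ===== CLAIM (what is proved, stated in full; the proofs are below) =====
def Claim_equal_categorize_references : Prop := ∀ (references : List String), Dom_categorize_references references → Pre_categorize_references references → Spec_categorize_references references (categorize_references references)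

-- ===== LEMMAS AND PROOFS =====

-- A's per-item rtype / reference_id expressions, named for the proof only
def pvParse (item : String) : String × String :=
  if PySem.Str.isIn "?" item then
    (PySem.List.pyGetD ((PySem.Str.split? item "?").getD []) 0 "",
     PySem.List.pyGetD ((PySem.Str.split? item "|").getD []) 1 "")
  else
    (PySem.List.pyGetD ((PySem.Str.split? item "/").getD []) 0 "",
     PySem.List.pyGetD ((PySem.Str.split? item "/").getD []) 1 "")

theorem pvParse_fst_empty : (pvParse "").1 = "" := by decide
theorem pvParse_snd_empty : (pvParse "").2 = "" := by decide

-- A's branching insert step equals B's setdefault-then-append step, on any dict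
theorem step_eq {κ : Type} [BEq κ] [LawfulBEq κ] (d : PySem.Dict κ (List String)) (k : κ) (v : String) :
    (if d.contains k then d.modify k [] (fun l => l ++ [v]) else d.insert k [v]) =
      (d.setdefault k []).modify k [] (fun l => l ++ [v]) := by
  by_cases h : d.contains k = true
  · rw [PySem.Dict.setdefault_of_contains d [] h, if_pos h]
  · rw [if_neg h, PySem.Dict.setdefault_of_not_contains d [] (by simpa using h)]
    show d.insert k [v] = (d.insert k []).insert k ((((d.insert k []).getD k [])) ++ [v])
    rw [PySem.Dict.getD_insert_self, PySem.Dict.insert_insert_self]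
    rfl

-- the fused one-pass step, with the parse named (proof-side helper)
def pvStep (d : PySem.Dict String (List String)) (item : String) : PySem.Dict String (List String) :=
  (d.setdefault (pvParse item).1 []).modify (pvParse item).1 [] (fun l => l ++ [(pvParse item).2])

theorem alt_eq_foldl (references : List String) :
    categorize_references_alt references = (references.foldl pvStep PySem.Dict.empty).items := by
  unfold categorize_references_alt
  have : (fun (d : PySem.Dict String (List String)) (item : String) =>
      let p :=
        if PySem.Str.isIn "?" item then
          (PySem.List.pyGetD ((PySem.Str.split? item "?").getD []) 0 "",
           PySem.List.pyGetD ((PySem.Str.split? item "|").getD []) 1 "")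
        else
          (PySem.List.pyGetD ((PySem.Str.split? item "/").getD []) 0 "",
           PySem.List.pyGetD ((PySem.Str.split? item "/").getD []) 1 "")
      (d.setdefault p.1 []).modify p.1 [] (fun l => l ++ [p.2])) = pvStep := by
    funext d item
    show ((d.setdefault (pvParse item).1 []).modify (pvParse item).1 [] (fun l => l ++ [(pvParse item).2])) = _
    rfl
  rw [this]

theorem a_eq_foldl (references : List String) :
    categorize_references references = (references.foldl pvStep PySem.Dict.empty).items := by
  unfold categorize_references
  have hmap1 : references.map (fun item =>
      if PySem.Str.isIn "?" item then PySem.List.pyGetD ((PySem.Str.split? item "?").getD []) 0 ""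
      else PySem.List.pyGetD ((PySem.Str.split? item "/").getD []) 0 "") =
      references.map (fun item => (pvParse item).1) := by
    refine List.map_congr_left (fun item _ => ?_)
    unfold pvParse; split <;> rfl
  have hmap2 : references.map (fun item =>
      if PySem.Str.isIn "?" item then PySem.List.pyGetD ((PySem.Str.split? item "|").getD []) 1 ""
      else PySem.List.pyGetD ((PySem.Str.split? item "/").getD []) 1 "") =
      references.map (fun item => (pvParse item).2) := by
    refine List.map_congr_left (fun item _ => ?_)
    unfold pvParse; split <;> rfl
  simp only [hmap1, hmap2]
  have hlen : PySem.List.len (references.map (fun item => (pvParse item).1)) =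
      PySem.List.len references := by
    simp [PySem.List.len]
  rw [hlen]
  have hstep : (fun (d : PySem.Dict String (List String)) (i : Int) =>
      let k := PySem.List.pyGetD (references.map (fun item => (pvParse item).1)) i ""
      let v := PySem.List.pyGetD (references.map (fun item => (pvParse item).2)) i ""
      if d.contains k then d.modify k [] (fun l => l ++ [v]) else d.insert k [v]) =
      (fun (d : PySem.Dict String (List String)) (i : Int) =>
        pvStep d (PySem.List.pyGetD references i "")) := by
    funext d i
    have h1 : PySem.List.pyGetD (references.map (fun item => (pvParse item).1)) i "" =
        (pvParse (PySem.List.pyGetD references i "")).1 := by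
      simpa [pvParse_fst_empty] using
        PySem.List.pyGetD_map (fun item => (pvParse item).1) references i (pvParse "").1
    have h2 : PySem.List.pyGetD (references.map (fun item => (pvParse item).2)) i "" =
        (pvParse (PySem.List.pyGetD references i "")).2 := by
      simpa [pvParse_snd_empty] using
        PySem.List.pyGetD_map (fun item => (pvParse item).2) references i (pvParse "").2
    show (if _ then _ else _) = _
    simp only [h1, h2]
    exact step_eq d _ _
  rw [hstep, PySem.List.foldl_pyRange_zero_pyGetD references "" pvStep PySem.Dict.empty]

-- ===== VERDICT (by name: the statement is the Claim_ definition above) =====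
theorem categorize_references_spec : Claim_equal_categorize_references := by
  intro references _ _
  show categorize_references references = categorize_references_alt references
  rw [a_eq_foldl, alt_eq_foldl]
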